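-- pv_equiv track=rewrite | github.com/mrsaraiva/aipoop | aipoop/music/theory.py | voice_lead
-- ===== SOURCE A (Python) =====
-- def voice_lead(
--     prev_chord: list[int],
--     next_pitches: list[int],
--     max_leap: int = 7,
-- ) -> list[int]:
--     """Revoice *next_pitches* to minimise movement from *prev_chord*.
--
--     For each pitch in *next_pitches* the algorithm finds the octave
--     transposition closest to the corresponding voice in *prev_chord* (or the
--     nearest voice when the chords have different lengths).  Movement is
--     clamped to *max_leap* semitones where possible.
--
--     Returns a new list of MIDI note numbers (same length as *next_pitches*).
--     """
--     if not prev_chord or not next_pitches: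
--         return list(next_pitches)
--
--     result: list[int] = []
--     for i, pitch in enumerate(next_pitches):
--         # Pick the reference voice: corresponding index, or nearest note.
--         if i < len(prev_chord):
--             ref = prev_chord[i]
--         else:
--             ref = min(prev_chord, key=lambda p, pc=pitch % 12: abs(p - pc))
--
--         # Find the octave placement of *pitch* closest to *ref*.
--         pc = pitch % 12
--         # Candidate octave base notes around ref
--         base = (ref // 12) * 12
--         candidates = [base + pc - 12, base + pc, base + pc + 12]
--         best = min(candidates, key=lambda c: abs(c - ref))
--
--         # Clamp leap if possible (but still keep the pitch class).
--         if abs(best - ref) > max_leap: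
--             # Try the next-closest candidate
--             candidates.sort(key=lambda c: abs(c - ref))
--             for cand in candidates:
--                 if abs(cand - ref) <= max_leap:
--                     best = cand
--                     break
--             # If no candidate fits within max_leap, keep the closest one.
--
--         result.append(best)
--
--     return result
-- ===== SOURCE B (Python) =====
-- def voice_lead(
--     prev_chord: list[int],
--     next_pitches: list[int],
--     max_leap: int = 7,
-- ) -> list[int]:
--     """Revoice next_pitches to minimise movement from prev_chord.
--
--     Closed form: the octave placement of a pitch class nearest to ref is
--     ref + ((pitch - ref + 6) % 12) - 6 (ties at a tritone resolve downward,
--     matching the candidate order of the reference implementation).  A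
--     12-entry table gives the nearest previous voice per pitch class for the
--     extra voices, so no per-pitch scan of prev_chord is needed.
--     """
--     if not prev_chord or not next_pitches:
--         return list(next_pitches)
--
--     n = len(prev_chord)
--     if len(next_pitches) > n:
--         nearest = [min(prev_chord, key=lambda p: abs(p - pc)) for pc in range(12)]
--     else:
--         nearest = []
--
--     out = []
--     for i, pitch in enumerate(next_pitches):
--         ref = prev_chord[i] if i < n else nearest[pitch % 12]
--         out.append(ref + (pitch - ref + 6) % 12 - 6)
--     return out
-- ===== Notes on version B (the rewrite author's own statement) =====
-- stated objective: faster
-- what changed: A's per-pitch 3-candidate min plus a dead clamp loop (the minimum candidate can never be replaced, since every other candidate is farther) is replaced by the closed form ref + ((pitch - ref + 6) % 12) - 6, and the per-pitch min-scan of prev_chord for extra voices is replaced by a 12-entry nearest-voice-per-pitch-class table built once.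
import Mathlib
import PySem

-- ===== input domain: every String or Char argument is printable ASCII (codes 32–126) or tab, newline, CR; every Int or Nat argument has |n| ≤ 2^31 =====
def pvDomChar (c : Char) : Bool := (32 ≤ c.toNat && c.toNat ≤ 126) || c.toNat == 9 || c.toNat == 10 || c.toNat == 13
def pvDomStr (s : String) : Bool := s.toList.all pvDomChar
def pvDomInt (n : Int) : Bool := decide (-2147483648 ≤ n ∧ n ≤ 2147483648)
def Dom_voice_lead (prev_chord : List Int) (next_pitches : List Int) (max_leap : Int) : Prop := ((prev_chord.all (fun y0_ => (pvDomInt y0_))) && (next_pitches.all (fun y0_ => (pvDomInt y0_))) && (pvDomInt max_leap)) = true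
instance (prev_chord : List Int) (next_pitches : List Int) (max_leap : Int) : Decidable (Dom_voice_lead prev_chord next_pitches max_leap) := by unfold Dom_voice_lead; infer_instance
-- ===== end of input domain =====

-- B replaces A's min-over-3-candidates (and its dead clamp loop) by the closed form
-- ref + ((pitch - ref + 6) mod 12) - 6 and a 12-entry nearest-voice table; objective: faster.

-- ===== PORT A =====
-- A-side helper: the reference voice chosen for index i / pitch (A's first if/else).
def pyRefA (prev_chord : List Int) (i pitch : Int) : Int :=
  if i < (prev_chord.length : Int) then PySem.List.pyGetD prev_chord i 0
  else (PySem.List.min? prev_chord (fun p => |p - PySem.Int.mod pitch 12|)).getD 0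
    -- min(prev_chord, key=…); prev_chord ≠ [] on this path, so the default is never used

-- A-side helper: candidate generation, min by distance, and the clamp attempt (A's loop body).
def pyBestA (ref pitch max_leap : Int) : Int :=
  let pc := PySem.Int.mod pitch 12
  let base := PySem.Int.floordiv ref 12 * 12
  let candidates := [base + pc - 12, base + pc, base + pc + 12]
  let best := (PySem.List.min? candidates (fun c => |c - ref|)).getD 0
  if max_leap < |best - ref| then
    -- candidates.sort(key=…) then 'for cand in candidates: if |cand-ref| ≤ max_leap: best = cand; break'
    match (PySem.List.sorted candidates (fun c => |c - ref|)).find?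
        (fun c => decide (|c - ref| ≤ max_leap)) with
    | some cand => cand
    | none => best
  else best

def voice_lead (prev_chord : List Int) (next_pitches : List Int) (max_leap : Int) : List Int :=
  if prev_chord = [] ∨ next_pitches = [] then next_pitches
  else
    (PySem.List.enumerate next_pitches).foldl
      (fun result ip => result ++ [pyBestA (pyRefA prev_chord ip.1 ip.2) ip.2 max_leap]) []

-- ===== PORT B =====
-- B-side helper: closed-form nearest octave placement of pitch's pitch class around ref.
def pyNoteB (ref pitch : Int) : Int := ref + PySem.Int.mod (pitch - ref + 6) 12 - 6

def voice_lead_alt (prev_chord : List Int) (next_pitches : List Int) (max_leap : Int) : List Int :=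
  if prev_chord = [] ∨ next_pitches = [] then next_pitches
  else
    let n := prev_chord.length
    let nearest :=
      if n < next_pitches.length then
        (PySem.List.pyRange 0 12 1).map
          (fun pc => (PySem.List.min? prev_chord (fun p => |p - pc|)).getD 0)
      else []
    (PySem.List.enumerate next_pitches).map
      (fun ip =>
        let ref := if ip.1 < (n : Int) then PySem.List.pyGetD prev_chord ip.1 0
                   else PySem.List.pyGetD nearest (PySem.Int.mod ip.2 12) 0
        pyNoteB ref ip.2)

-- ===== PRECONDITION & SPEC =====
def Spec_voice_lead (prev_chord : List Int) (next_pitches : List Int) (max_leap : Int) (out : List Int) : Prop := out = voice_lead_alt prev_chord next_pitches max_leap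
instance (prev_chord : List Int) (next_pitches : List Int) (max_leap : Int) (out : List Int) : Decidable (Spec_voice_lead prev_chord next_pitches max_leap out) := by unfold Spec_voice_lead; infer_instance

-- ===== CLAIM (what is proved, stated in full; the proofs are below) =====
def Claim_equal_voice_lead : Prop := ∀ (prev_chord : List Int) (next_pitches : List Int) (max_leap : Int), Dom_voice_lead prev_chord next_pitches max_leap → Spec_voice_lead prev_chord next_pitches max_leap (voice_lead prev_chord next_pitches max_leap)

-- ===== LEMMAS AND PROOFS =====

-- A's per-note result equals the closed form: the minimum-distance candidate is
-- ref + ((pitch - ref + 6) mod 12) - 6, and the clamp branch is a no-op (every other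
-- candidate is at least as far from ref as the minimum, so the find? yields nothing new).
theorem pyBestA_eq_pyNoteB (ref pitch max_leap : Int) :
    pyBestA ref pitch max_leap = pyNoteB ref pitch := by
  have h1 := PySem.Int.floordiv_mul_add_mod ref 12
  have h2 := PySem.Int.mod_nonneg ref (b := 12) (by norm_num)
  have h3 := PySem.Int.mod_lt ref (b := 12) (by norm_num)
  have h4 := PySem.Int.floordiv_mul_add_mod pitch 12
  have h5 := PySem.Int.mod_nonneg pitch (b := 12) (by norm_num)
  have h6 := PySem.Int.mod_lt pitch (b := 12) (by norm_num)
  have h7 := PySem.Int.floordiv_mul_add_mod (pitch - ref + 6) 12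
  have h8 := PySem.Int.mod_nonneg (pitch - ref + 6) (b := 12) (by norm_num)
  have h9 := PySem.Int.mod_lt (pitch - ref + 6) (b := 12) (by norm_num)
  unfold pyBestA pyNoteB
  set pc := PySem.Int.mod pitch 12 with hpc
  set base := PySem.Int.floordiv ref 12 * 12 with hbase
  set m := PySem.Int.mod (pitch - ref + 6) 12 with hm
  have hbest : (PySem.List.min? [base + pc - 12, base + pc, base + pc + 12]
      (fun c => |c - ref|)).getD 0 = ref + m - 6 := by
    simp only [PySem.List.min?, List.foldl]
    by_cases a1 : |base + pc - ref| < |base + pc - 12 - ref| <;>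
      simp only [a1, if_true, if_false] <;>
    · first
      | (by_cases a2 : |base + pc + 12 - ref| < |base + pc - ref| <;>
          simp only [a2, reduceIte, Option.getD] <;>
          simp only [Int.abs_eq_natAbs] at * <;> omega)
      | (by_cases a2 : |base + pc + 12 - ref| < |base + pc - 12 - ref| <;>
          simp only [a2, reduceIte, Option.getD] <;>
          simp only [Int.abs_eq_natAbs] at * <;> omega)
  dsimp only
  rw [hbest]
  by_cases hc : max_leap < |ref + m - 6 - ref| <;> simp only [hc, reduceIte]
  -- the clamp loop finds nothing: every candidate is at least as far from ref as the minimum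
  rw [List.find?_eq_none.mpr]
  intro x hx
  rw [PySem.List.mem_sorted] at hx
  simp only [List.mem_cons, List.not_mem_nil, or_false] at hx
  simp only [decide_eq_true_eq, not_le]
  simp only [Int.abs_eq_natAbs] at *
  rcases hx with rfl | rfl | rfl <;> omega

-- the nearest-voice table lookup equals A's per-pitch min
theorem nearest_lookup (prev_chord : List Int) (pitch : Int) :
    PySem.List.pyGetD
      ((PySem.List.pyRange 0 12 1).map
        (fun pc => (PySem.List.min? prev_chord (fun p => |p - pc|)).getD 0))
      (PySem.Int.mod pitch 12) 0
    = (PySem.List.min? prev_chord (fun p => |p - PySem.Int.mod pitch 12|)).getD 0 := by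
  exact PySem.List.pyGetD_map_pyRange_of_nonneg _ 12 _ 0
    (PySem.Int.mod_nonneg pitch (by norm_num)) (PySem.Int.mod_lt pitch (by norm_num))

-- ===== VERDICT (by name: the statement is the Claim_ definition above) =====
theorem voice_lead_spec : Claim_equal_voice_lead := by
  unfold Claim_equal_voice_lead
  intro prev_chord next_pitches max_leap _
  unfold Spec_voice_lead voice_lead voice_lead_alt
  by_cases h : prev_chord = [] ∨ next_pitches = []
  · simp only [h, if_true]
  · simp only [h, if_false]
    rw [PySem.List.foldl_append_singleton_eq_map]
    rw [List.nil_append]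
    apply List.map_congr_left
    intro ip hip
    rw [PySem.List.mem_enumerate_iff] at hip
    obtain ⟨k, hk, rfl⟩ := hip
    rw [pyBestA_eq_pyNoteB]
    dsimp only
    congr 1
    unfold pyRefA
    by_cases hi : ((0 : Int) + (k : Int)) < (prev_chord.length : Int)
    · simp only [hi, if_true]
    · simp only [hi, if_false]
      have hlen : prev_chord.length < next_pitches.length := by
        push_cast at hi; omega
      rw [if_pos hlen]
      exact (nearest_lookup prev_chord _).symm
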